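-- pv_equiv track=rewrite | github.com/avidito/inquisio | api/application/database/sql.py | convert_regex_pattern_columns
-- ===== SOURCE A (Python) =====
-- def convert_regex_pattern_columns(params, convert_list):
--     """Convert string query params to support LIKE filter"""
--
--     fmt_params = {}
--     for col in params.keys():
--         if (col in convert_list):
--             fmt_params[col] = params[col] if (params[col] != "all") else "%"
--         else:
--             fmt_params[col] = params[col]
--     return fmt_params
-- ===== SOURCE B (Python) =====
-- def convert_regex_pattern_columns(params, convert_list):
--     """Convert string query params to support LIKE filter"""
--     fmt_params = dict(params)
--     for col in convert_list:
--         if col in fmt_params and fmt_params[col] == "all":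
--             fmt_params[col] = "%"
--     return fmt_params
-- ===== Notes on version B (the rewrite author's own statement) =====
-- stated objective: faster
-- what changed: B copies the params dict once and then traverses convert_list, patching in place the entries whose value is 'all', instead of rebuilding the dict key-by-key with a per-key 'col in convert_list' list scan.
import Mathlib
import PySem

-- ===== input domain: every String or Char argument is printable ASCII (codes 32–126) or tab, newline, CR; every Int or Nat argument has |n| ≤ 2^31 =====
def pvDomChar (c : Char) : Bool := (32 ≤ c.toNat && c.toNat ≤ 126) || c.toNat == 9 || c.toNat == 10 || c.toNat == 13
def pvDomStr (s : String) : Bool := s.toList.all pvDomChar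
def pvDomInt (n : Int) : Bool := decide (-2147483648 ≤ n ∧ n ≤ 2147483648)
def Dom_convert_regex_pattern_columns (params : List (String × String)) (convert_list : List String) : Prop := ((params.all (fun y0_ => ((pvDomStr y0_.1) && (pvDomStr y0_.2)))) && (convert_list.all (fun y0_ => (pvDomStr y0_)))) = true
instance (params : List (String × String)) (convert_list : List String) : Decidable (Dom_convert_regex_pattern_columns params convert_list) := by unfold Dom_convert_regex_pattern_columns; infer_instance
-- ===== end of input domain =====

-- B copies the params dict once and then patches, over convert_list, the entries whose value is "all";
-- A rebuilds the dict key-by-key with a per-key membership scan of convert_list (objective: faster).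

-- ===== PORT A =====
def convert_regex_pattern_columns (params : List (String × String)) (convert_list : List String) : List (String × String) :=
  -- fmt_params = {}; for col in params.keys(): ...  (params is a dict; each pair gives col and params[col])
  (params.foldl (fun fmt kv =>
      if convert_list.contains kv.1 then
        fmt.insert kv.1 (if kv.2 ≠ "all" then kv.2 else "%")
      else
        fmt.insert kv.1 kv.2)
    PySem.Dict.empty).items

-- ===== PORT B =====
def convert_regex_pattern_columns_alt (params : List (String × String)) (convert_list : List String) : List (String × String) :=
  -- fmt_params = dict(params)
  let fmt := params.foldl (fun d kv => d.insert kv.1 kv.2) PySem.Dict.empty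
  -- for col in convert_list: if col in fmt_params and fmt_params[col] == "all": fmt_params[col] = "%"
  (convert_list.foldl (fun d col =>
      if d.contains col && (d.getD col "" == "all") then d.insert col "%" else d)
    fmt).items

-- ===== PRECONDITION & SPEC =====
def Spec_convert_regex_pattern_columns (params : List (String × String)) (convert_list : List String) (out : List (String × String)) : Prop := out = convert_regex_pattern_columns_alt params convert_list
instance (params : List (String × String)) (convert_list : List String) (out : List (String × String)) : Decidable (Spec_convert_regex_pattern_columns params convert_list out) := by unfold Spec_convert_regex_pattern_columns; infer_instance

-- ===== CLAIM (what is proved, stated in full; the proofs are below) =====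
def Claim_equal_convert_regex_pattern_columns : Prop := ∀ (params : List (String × String)) (convert_list : List String), Dom_convert_regex_pattern_columns params convert_list → Spec_convert_regex_pattern_columns params convert_list (convert_regex_pattern_columns params convert_list)

-- ===== LEMMAS AND PROOFS =====

-- the one patch step of B's loop
def pvStep (d : PySem.Dict String String) (col : String) : PySem.Dict String String :=
  if d.contains col && (d.getD col "" == "all") then d.insert col "%" else d

-- B's patch loop
def pvPatch (cl : List String) (d : PySem.Dict String String) : PySem.Dict String String :=
  cl.foldl pvStep d

-- what the patch loop does to a freshly inserted value
def pvG (cl : List String) (k v : String) : String :=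
  if cl.contains k && (v == "all") then "%" else v

theorem pvPatch_empty (cl : List String) : pvPatch cl PySem.Dict.empty = PySem.Dict.empty := by
  induction cl with
  | nil => rfl
  | cons c cl ih =>
    simp [pvPatch, List.foldl, pvStep, PySem.Dict.contains_empty] at *
    exact ih

-- overwriting an existing key commutes with inserting a different key
theorem pvInsert_comm (d : PySem.Dict String String) (k v col w : String)
    (hne : col ≠ k) (hc : d.contains col = true) :
    (d.insert k v).insert col w = (d.insert col w).insert k v := by
  apply PySem.Dict.ext
  have hkc : ¬ k = col := fun h => hne h.symm
  have hc1 : (d.insert k v).contains col = true := by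
    rw [PySem.Dict.contains_insert]; simp [hc]
  have hc2 : (d.insert col w).contains k = d.contains k := by
    rw [PySem.Dict.contains_insert]; simp [hkc]
  rw [PySem.Dict.items_insert_of_contains _ _ hc1]
  by_cases hk : d.contains k = true
  · rw [PySem.Dict.items_insert_of_contains _ _ hk,
        PySem.Dict.items_insert_of_contains _ _ (by rw [hc2]; exact hk),
        PySem.Dict.items_insert_of_contains _ _ hc, List.map_map, List.map_map]
    apply List.map_congr_left
    intro p _
    by_cases h1 : p.1 = k <;> by_cases h2 : p.1 = col <;>
      simp_all [Function.comp]
  · have hk' : d.contains k = false := by simpa using hk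
    rw [PySem.Dict.items_insert_of_not_contains _ _ hk',
        PySem.Dict.items_insert_of_not_contains _ _ (by rw [hc2]; exact hk'),
        PySem.Dict.items_insert_of_contains _ _ hc, List.map_append]
    simp [hkc]

-- the key lemma: patching after an insert = inserting the patched value into the patched dict
theorem pvPatch_insert (cl : List String) (d : PySem.Dict String String) (k v : String) :
    pvPatch cl (d.insert k v) = (pvPatch cl d).insert k (pvG cl k v) := by
  induction cl generalizing d v with
  | nil => simp [pvPatch, pvG]
  | cons col cl ih =>
    have hPc : pvPatch (col :: cl) d = pvPatch cl (pvStep d col) := rfl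
    have hL : pvPatch (col :: cl) (d.insert k v) = pvPatch cl (pvStep (d.insert k v) col) := rfl
    by_cases hck : col = k
    · subst hck
      -- the patched dict is later overwritten at col anyway
      have hover : ∀ w : String, (pvPatch cl (pvStep d col)).insert col w
          = (pvPatch cl d).insert col w := by
        intro w
        by_cases hs : d.contains col && (d.getD col "" == "all")
        · simp only [pvStep, if_pos hs, ih, PySem.Dict.insert_insert_self]
        · simp only [pvStep, if_neg hs]
      by_cases hv : v = "all"
      · subst hv
        have hstep : pvStep (d.insert col "all") col = d.insert col "%" := by
          simp [pvStep, PySem.Dict.contains_insert_self, PySem.Dict.getD_insert_self,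
            PySem.Dict.insert_insert_self]
        rw [hL, hstep, ih, hPc, hover]
        simp [pvG]
      · have hstep : pvStep (d.insert col v) col = d.insert col v := by
          simp [pvStep, PySem.Dict.contains_insert_self, PySem.Dict.getD_insert_self, hv]
        rw [hL, hstep, ih, hPc, hover]
        simp [pvG, hv]
    · have hcont : (d.insert k v).contains col = d.contains col := by
        rw [PySem.Dict.contains_insert]
        simp [show (col == k) = false from by simp [hck]]
      have hgetD : (d.insert k v).getD col "" = d.getD col "" := by
        rw [PySem.Dict.getD_insert]; simp [hck]
      have hkcol : ¬ k = col := fun h => hck h.symm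
      have hgk : pvG (col :: cl) k v = pvG cl k v := by
        simp [pvG, hkcol]
      by_cases hs : d.contains col && (d.getD col "" == "all")
      · have hc' : d.contains col = true := by simpa using And.left (by simpa using hs)
        have hstep : pvStep (d.insert k v) col = (d.insert col "%").insert k v := by
          simp only [pvStep, hcont, hgetD, if_pos hs]
          exact pvInsert_comm d k v col "%" hck hc'
        have hstep' : pvStep d col = d.insert col "%" := by simp only [pvStep, if_pos hs]
        rw [hL, hstep, ih, hPc, hstep', hgk]
      · have hstep : pvStep (d.insert k v) col = d.insert k v := by
          simp only [pvStep, hcont, hgetD, if_neg hs]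
        have hstep' : pvStep d col = d := by simp only [pvStep, if_neg hs]
        rw [hL, hstep, ih, hPc, hstep', hgk]

-- A's per-pair value is exactly what the patch loop produces
theorem pvG_eq (cl : List String) (k v : String) :
    pvG cl k v = if cl.contains k then (if v ≠ "all" then v else "%") else v := by
  unfold pvG
  by_cases h1 : cl.contains k <;> by_cases h2 : v = "all" <;> simp [h2]

-- main fold lemma
theorem pvMain (cl : List String) (params : List (String × String)) (d : PySem.Dict String String) :
    pvPatch cl (params.foldl (fun d kv => d.insert kv.1 kv.2) d)
      = params.foldl (fun fmt kv =>
          if cl.contains kv.1 then fmt.insert kv.1 (if kv.2 ≠ "all" then kv.2 else "%")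
          else fmt.insert kv.1 kv.2) (pvPatch cl d) := by
  induction params generalizing d with
  | nil => rfl
  | cons kv ps ih =>
    simp only [List.foldl_cons, ih, pvPatch_insert, pvG_eq]
    by_cases h : kv.1 ∈ cl <;> simp [h]

-- ===== VERDICT (by name: the statement is the Claim_ definition above) =====
theorem convert_regex_pattern_columns_spec : Claim_equal_convert_regex_pattern_columns := by
  intro params convert_list _
  unfold Spec_convert_regex_pattern_columns convert_regex_pattern_columns convert_regex_pattern_columns_alt
  show _ = (pvPatch convert_list (params.foldl (fun d kv => d.insert kv.1 kv.2) PySem.Dict.empty)).items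
  rw [pvMain, pvPatch_empty]
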